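-- pv_equiv track=rewrite | github.com/Wolflab/AFLPs | compare_2_files.py | get_xl_col
-- ===== SOURCE A (Python) =====
-- def get_xl_col(index):
--     column = ''
--     counter = 0
--     a1 = " ABCDEFGHIJKLMNOPQRSTUVWXYZ"
--     a2 = "ABCDEFGHIJKLMNOPQRSTUVWXYZ"
--     for first in a1:
--         for second in a2:
--             counter +=1
--             if counter == (index):
--                 column = str(first) + str(second)
--                 break
--     return column
-- ===== SOURCE B (Python) =====
-- def get_xl_col(index):
--     if 1 <= index <= 702:
--         q, r = divmod(index - 1, 26)
--         return " ABCDEFGHIJKLMNOPQRSTUVWXYZ"[q:q+1] + "ABCDEFGHIJKLMNOPQRSTUVWXYZ"[r:r+1]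
--     return ''
-- ===== Notes on version B (the rewrite author's own statement) =====
-- stated objective: simpler
-- what changed: Replaces the 27x26 nested counting scan (increment a counter until it equals index) by a range guard plus a direct divmod(index-1, 26) computation that slices the two letters out of the alphabet strings.
import Mathlib
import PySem

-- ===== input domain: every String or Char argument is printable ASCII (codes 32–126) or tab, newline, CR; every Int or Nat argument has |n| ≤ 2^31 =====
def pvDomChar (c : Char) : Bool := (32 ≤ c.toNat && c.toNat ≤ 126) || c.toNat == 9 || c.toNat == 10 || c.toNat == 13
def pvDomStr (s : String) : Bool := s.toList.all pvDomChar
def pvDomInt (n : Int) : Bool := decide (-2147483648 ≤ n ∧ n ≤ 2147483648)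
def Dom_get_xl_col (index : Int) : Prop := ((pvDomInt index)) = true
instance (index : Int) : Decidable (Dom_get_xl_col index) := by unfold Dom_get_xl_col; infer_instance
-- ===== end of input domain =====

-- B replaces A's 702-step nested counting scan by a direct divmod computation (objective: simpler).

-- ===== PORT A =====
-- inner 'for second in a2' loop: counter increments; on counter == index the column is set and the loop breaks
def pvInnerA (index : Int) (first : Char) : List Char → Int → List Char → Int × List Char
  | [], counter, column => (counter, column)
  | second :: rest, counter, column =>
      if counter + 1 = index then (counter + 1, [first, second])
      else pvInnerA index first rest (counter + 1) column

-- outer 'for first in a1' loop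
def pvOuterA (index : Int) : List Char → Int → List Char → List Char
  | [], _, column => column
  | first :: rest, counter, column =>
      let p := pvInnerA index first ("ABCDEFGHIJKLMNOPQRSTUVWXYZ".toList) counter column
      pvOuterA index rest p.1 p.2

def get_xl_col (index : Int) : String :=
  String.ofList (pvOuterA index (" ABCDEFGHIJKLMNOPQRSTUVWXYZ".toList) 0 [])

-- ===== PORT B =====
-- characters of B's two one-character slices a1[q:q+1] + a2[r:r+1]
def pvSlicesB (index : Int) : List Char :=
  PySem.List.slice (" ABCDEFGHIJKLMNOPQRSTUVWXYZ".toList)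
      (some (PySem.Int.floordiv (index - 1) 26)) (some (PySem.Int.floordiv (index - 1) 26 + 1)) ++
    PySem.List.slice ("ABCDEFGHIJKLMNOPQRSTUVWXYZ".toList)
      (some (PySem.Int.mod (index - 1) 26)) (some (PySem.Int.mod (index - 1) 26 + 1))

def get_xl_col_alt (index : Int) : String :=
  if 1 ≤ index ∧ index ≤ 702 then String.ofList (pvSlicesB index)
  else ""

-- ===== PRECONDITION & SPEC =====
def Spec_get_xl_col (index : Int) (out : String) : Prop := out = get_xl_col_alt index
instance (index : Int) (out : String) : Decidable (Spec_get_xl_col index out) := by unfold Spec_get_xl_col; infer_instance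

-- ===== CLAIM (what is proved, stated in full; the proofs are below) =====
def Claim_equal_get_xl_col : Prop := ∀ (index : Int), Dom_get_xl_col index → Spec_get_xl_col index (get_xl_col index)

-- ===== LEMMAS AND PROOFS =====

-- if the index is not hit inside this inner pass, the column is unchanged and the counter advances by the length
theorem pvInnerA_miss (index : Int) (first : Char) (l : List Char) (counter : Int) (column : List Char)
    (h : index ≤ counter ∨ counter + l.length < index) :
    pvInnerA index first l counter column = (counter + l.length, column) := by
  induction l generalizing counter with
  | nil => simp [pvInnerA]
  | cons c rest ih =>
      rw [pvInnerA, if_neg (by simp at h; omega), ih _ (by simp at h ⊢; omega)]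
      simp; omega

-- if the index is never hit, the whole nested scan leaves the column unchanged
theorem pvOuterA_miss (index : Int) (l : List Char) (counter : Int) (column : List Char)
    (h : index ≤ counter ∨ counter + 26 * l.length < index) :
    pvOuterA index l counter column = column := by
  induction l generalizing counter with
  | nil => simp [pvOuterA]
  | cons c rest ih =>
      rw [pvOuterA, pvInnerA_miss _ _ _ _ _ (by simp at h ⊢; omega)]
      exact ih _ (by simp at h ⊢; omega)

-- if the index is hit inside this inner pass, the loop breaks with the matching pair
theorem pvInnerA_hit (index : Int) (first : Char) (l : List Char) (counter : Int) (column : List Char)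
    (h1 : counter < index) (h2 : index ≤ counter + l.length) :
    pvInnerA index first l counter column = (index, [first, l.getD (index - counter - 1).toNat ' ']) := by
  induction l generalizing counter with
  | nil => simp at h2; omega
  | cons c rest ih =>
      rw [pvInnerA]
      by_cases hc : counter + 1 = index
      · rw [if_pos hc]
        have h0 : (index - counter - 1).toNat = 0 := by omega
        simp [h0, hc]
      · rw [if_neg hc, ih (counter + 1) (by omega) (by simp at h2 ⊢; omega)]
        have hs : (index - counter - 1).toNat = (index - (counter + 1) - 1).toNat + 1 := by omega
        simp [hs]

-- the nested scan, when the index lands inside it, produces the block character and the offset character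
theorem pvOuterA_hit (index : Int) (l : List Char) (counter : Int) (column : List Char)
    (h1 : counter < index) (h2 : index ≤ counter + 26 * l.length) :
    pvOuterA index l counter column =
      [l.getD ((index - counter - 1).toNat / 26) ' ',
       ("ABCDEFGHIJKLMNOPQRSTUVWXYZ".toList).getD ((index - counter - 1).toNat % 26) ' '] := by
  induction l generalizing counter column with
  | nil => simp at h2; omega
  | cons f rest ih =>
      rw [pvOuterA]
      by_cases hd : index ≤ counter + 26
      · rw [pvInnerA_hit index f _ counter column h1 (by simp; omega)]
        rw [pvOuterA_miss index rest index _ (Or.inl le_rfl)]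
        simp
        have hx0 : ((index - counter).toNat - 1) / 26 = 0 := by omega
        have hx1 : ((index - counter).toNat - 1) % 26 = (index - counter).toNat - 1 := by omega
        rw [hx0, hx1]
        simp
      · rw [pvInnerA_miss index f _ counter column (by simp; omega)]
        have h26 : (("ABCDEFGHIJKLMNOPQRSTUVWXYZ".toList)).length = 26 := by decide
        simp only [h26]
        push_cast
        rw [ih (counter + 26) column (by omega) (by simp at h2 ⊢; omega)]
        simp
        have ha : ((index - counter).toNat - 1) / 26 = ((index - (counter + 26)).toNat - 1) / 26 + 1 := by omega
        have hb : ((index - counter).toNat - 1) % 26 = ((index - (counter + 26)).toNat - 1) % 26 := by omega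
        rw [ha, hb]
        simp

-- one-character slice of a list is the singleton of its element
theorem pv_take_one_drop (xs : List Char) (j : Nat) (h : j < xs.length) :
    (xs.drop j).take 1 = [xs.getD j ' '] := by
  simp [List.take_one, List.head?_drop, List.getElem?_eq_getElem h]

-- ===== VERDICT (by name: the statement is the Claim_ definition above) =====
theorem get_xl_col_spec : Claim_equal_get_xl_col := by
  intro index _
  unfold Spec_get_xl_col
  by_cases h : 1 ≤ index ∧ index ≤ 702
  · rw [get_xl_col_alt, if_pos h, get_xl_col]
    have hd : index - 1 = (((index - 1).toNat : Nat) : Int) := by omega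
    rw [pvOuterA_hit index _ 0 [] (by omega) (by simp; omega)]
    congr 1
    have hz : index - 0 - 1 = index - 1 := by ring
    rw [hz]
    unfold pvSlicesB
    have hq : PySem.Int.floordiv ((((index - 1).toNat : Nat)) : Int) 26 = (((index - 1).toNat / 26 : Nat) : Int) := by
      exact_mod_cast PySem.Int.floordiv_natCast (index - 1).toNat 26
    have hr : PySem.Int.mod ((((index - 1).toNat : Nat)) : Int) 26 = (((index - 1).toNat % 26 : Nat) : Int) := by
      exact_mod_cast PySem.Int.mod_natCast (index - 1).toNat 26
    rw [hd, hq, hr]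
    have c1 : (((((index - 1).toNat) / 26 : Nat) : Int) + 1) = ((((index - 1).toNat / 26 + 1 : Nat)) : Int) := by push_cast; ring
    have c2 : (((((index - 1).toNat) % 26 : Nat) : Int) + 1) = ((((index - 1).toNat % 26 + 1 : Nat)) : Int) := by push_cast; ring
    rw [c1, c2, PySem.List.slice_natCast, PySem.List.slice_natCast]
    have e1 : (index - 1).toNat / 26 + 1 - (index - 1).toNat / 26 = 1 := by omega
    have e2 : (index - 1).toNat % 26 + 1 - (index - 1).toNat % 26 = 1 := by omega
    rw [e1, e2, pv_take_one_drop _ _ (by simp; omega), pv_take_one_drop _ _ (by simp; omega)]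
    simp
  · rw [get_xl_col_alt, if_neg h, get_xl_col,
      pvOuterA_miss _ _ _ _ (by simp; omega)]
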